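-- pv_equiv track=rewrite | github.com/dh-r-uv/Reed-Solomon | Reed_Solomon.py | Rational_reconstruction
-- ===== SOURCE A (Python) =====
-- def Rational_reconstruction(n, b, R, T):
--     r_cur = n
--     r_prev = b
--     s_cur = 1
--     t_cur = 0
--     s_old = 0
--     t_old = 1
--     while r_prev > R:
--         q = r_cur // r_prev
--         r_cur, r_prev = r_prev, r_cur - q * r_prev
--         s_cur, s_old = s_old, s_cur - q * s_old
--         t_cur, t_old = t_old, t_cur - q * t_old
--     return r_prev, t_old, s_old
-- ===== SOURCE B (Python) =====
-- def Rational_reconstruction(n, b, R, T):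
--     def helper(a, c):
--         # returns (g, x, y) with g = x*a + y*c, following the same remainder sequence
--         if c <= R:
--             return (c, 0, 1)
--         g, x, y = helper(c, a % c)
--         return (g, y, x - (a // c) * y)
--     g, x, y = helper(n, b)
--     return (g, y, x)
-- ===== Notes on version B (the rewrite author's own statement) =====
-- stated objective: alternative
-- what changed: Replaces the forward six-variable iterative extended-Euclid loop by a post-order recursive helper that follows the remainder sequence down and reconstructs the Bezout coefficients on the way back up.
import Mathlib
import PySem

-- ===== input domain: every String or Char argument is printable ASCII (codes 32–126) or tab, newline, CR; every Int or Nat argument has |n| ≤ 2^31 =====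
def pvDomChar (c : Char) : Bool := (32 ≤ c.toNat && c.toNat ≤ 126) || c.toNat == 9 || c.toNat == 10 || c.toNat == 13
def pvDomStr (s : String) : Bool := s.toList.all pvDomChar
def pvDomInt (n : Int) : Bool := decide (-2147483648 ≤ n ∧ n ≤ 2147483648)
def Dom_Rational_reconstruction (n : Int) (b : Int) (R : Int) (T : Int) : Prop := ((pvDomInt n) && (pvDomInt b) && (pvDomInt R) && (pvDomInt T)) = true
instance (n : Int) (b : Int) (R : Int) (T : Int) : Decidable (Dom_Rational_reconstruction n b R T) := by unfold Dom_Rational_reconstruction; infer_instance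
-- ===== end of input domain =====

-- B replaces A's forward six-variable extended-Euclid loop by a post-order recursive
-- helper that reconstructs the Bezout coefficients on the way back (objective: alternative).

-- ===== PORT A =====
-- A's while-loop as fuel recursion; on Pre_ inputs rp strictly decreases and stays ≥ 0,
-- sO fuel b.toNat + 1 is never exhausted (fuel is only a totality guard).
def rrLoopA (R : Int) : Nat → Int → Int → Int → Int → Int → Int → Int × Int × Int
  | 0, _, rp, _, _, sO, tO => (rp, tO, sO)
  | f+1, rc, rp, sc, tc, sO, tO =>
    if R < rp then
      let q := PySem.Int.floordiv rc rp
      rrLoopA R f rp (rc - q * rp) sO tO (sc - q * sO) (tc - q * tO)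
    else (rp, tO, sO)

def Rational_reconstruction (n : Int) (b : Int) (R : Int) (T : Int) : Int × Int × Int :=
  rrLoopA R (b.toNat + 1) n b 1 0 0 1

-- ===== PORT B =====
-- Source B's recursive helper(a, c): (g, x, y) with g = x*a + y*c; fuel as totality guard.
def rrHelperB (R : Int) : Nat → Int → Int → Int × Int × Int
  | 0, _, c => (c, 0, 1)
  | f+1, a, c =>
    if c ≤ R then (c, 0, 1)
    else
      let r := rrHelperB R f c (PySem.Int.mod a c)
      (r.1, r.2.2, r.2.1 - (PySem.Int.floordiv a c) * r.2.2)

def Rational_reconstruction_alt (n : Int) (b : Int) (R : Int) (T : Int) : Int × Int × Int :=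
  let r := rrHelperB R (b.toNat + 1) n b
  (r.1, r.2.2, r.2.1)

-- ===== PRECONDITION & SPEC =====
-- Pre_ excludes exactly the inputs on which A raises ZeroDivisionError: with R < 0 and
-- b > R the remainder sequence reaches 0 > R and the next quotient divides by zero.
def Pre_Rational_reconstruction (n : Int) (b : Int) (R : Int) (T : Int) : Prop := 0 ≤ R ∨ b ≤ R
instance (n : Int) (b : Int) (R : Int) (T : Int) : Decidable (Pre_Rational_reconstruction n b R T) := by unfold Pre_Rational_reconstruction; infer_instance
def pvWitness_Rational_reconstruction : Int × Int × Int × Int := (7, 5, 2, 0)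

def Spec_Rational_reconstruction (n : Int) (b : Int) (R : Int) (T : Int) (out : Int × Int × Int) : Prop := out = Rational_reconstruction_alt n b R T
instance (n : Int) (b : Int) (R : Int) (T : Int) (out : Int × Int × Int) : Decidable (Spec_Rational_reconstruction n b R T out) := by unfold Spec_Rational_reconstruction; infer_instance

-- ===== CLAIM (what is proved, stated in full; the proofs are below) =====
def Claim_equal_Rational_reconstruction : Prop := ∀ (n : Int) (b : Int) (R : Int) (T : Int), Dom_Rational_reconstruction n b R T → Pre_Rational_reconstruction n b R T → Spec_Rational_reconstruction n b R T (Rational_reconstruction n b R T)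

-- ===== LEMMAS AND PROOFS =====

-- The forward loop from any coefficient state equals the backward reconstruction,
-- combined linearly with that state.  Holds for every fuel and every input since
-- PySem.Int.mod a c = a - (a // c) * c holds for every c (both are total).
theorem rrLoopA_eq_helperB (R : Int) (f : Nat) :
    ∀ (rc rp sc tc sO tO : Int),
      rrLoopA R f rc rp sc tc sO tO =
        ((rrHelperB R f rc rp).1,
         tc * (rrHelperB R f rc rp).2.1 + tO * (rrHelperB R f rc rp).2.2,
         sc * (rrHelperB R f rc rp).2.1 + sO * (rrHelperB R f rc rp).2.2) := by
  induction f with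
  | zero =>
    intro rc rp sc tc sO tO
    simp [rrLoopA, rrHelperB]
  | succ f ih =>
    intro rc rp sc tc sO tO
    by_cases h : R < rp
    · have hmod : PySem.Int.mod rc rp = rc - PySem.Int.floordiv rc rp * rp := by
        have := PySem.Int.floordiv_mul_add_mod rc rp
        linarith
      have hnot : ¬ rp ≤ R := not_le.mpr h
      simp only [rrLoopA, rrHelperB, if_pos h, if_neg hnot, hmod]
      rw [ih]
      ring_nf
    · have hle : rp ≤ R := not_lt.mp h
      simp [rrLoopA, rrHelperB, if_neg h, if_pos hle]

-- ===== VERDICT (by name: the statement is the Claim_ definition above) =====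
theorem Rational_reconstruction_spec : Claim_equal_Rational_reconstruction := by
  intro n b R T _ _
  unfold Spec_Rational_reconstruction Rational_reconstruction Rational_reconstruction_alt
  rw [rrLoopA_eq_helperB]
  ring_nf
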